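-- pv_equiv track=rewrite | github.com/blanq08/Tetris-app | asd.py | sum_of_borders
-- ===== SOURCE A (Python) =====
-- def sum_of_borders(nums):
--     if not nums:  # Check if the list is empty
--         return 0
--
--     rows = len(nums)
--     cols = len(nums[0])
--
--     total = 0
--
--     for i in range(rows):
--         for j in range(cols):
--             # Check if the element is on the border
--             if i == 0 or i == rows - 1 or j == 0 or j == cols - 1:
--                 total += nums[i][j]
--
--     return total
-- ===== SOURCE B (Python) =====
-- def sum_of_borders(nums):
--     if not nums:
--         return 0
--     cols = len(nums[0])
--     if cols == 0:
--         return 0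
--     rows = len(nums)
--     if rows == 1:
--         return sum(nums[0][:cols])
--     total = sum(nums[0][:cols]) + sum(nums[-1][:cols])
--     for row in nums[1:-1]:
--         total += row[0]
--         if cols > 1:
--             total += row[cols - 1]
--     return total
-- ===== Notes on version B (the rewrite author's own statement) =====
-- stated objective: faster
-- what changed: A scans every cell of the rows*cols grid and tests each index for being on the border; B sums the first and last rows directly and adds only the two end elements of each middle row, never visiting interior cells.
import Mathlib
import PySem

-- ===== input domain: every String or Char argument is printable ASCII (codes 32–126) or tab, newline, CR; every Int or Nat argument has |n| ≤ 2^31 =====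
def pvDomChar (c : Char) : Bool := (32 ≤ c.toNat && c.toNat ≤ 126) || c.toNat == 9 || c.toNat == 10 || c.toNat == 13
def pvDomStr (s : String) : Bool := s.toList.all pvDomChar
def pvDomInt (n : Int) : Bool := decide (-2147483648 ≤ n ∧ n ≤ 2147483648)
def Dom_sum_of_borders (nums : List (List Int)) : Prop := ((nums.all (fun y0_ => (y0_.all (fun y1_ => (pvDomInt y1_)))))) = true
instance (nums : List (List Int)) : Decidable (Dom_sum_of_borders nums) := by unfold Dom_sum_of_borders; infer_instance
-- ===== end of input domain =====

-- B replaces A's rows×cols double loop by summing the first and last rows and the two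
-- end elements of each middle row (O(rows+cols) work beyond reading the border).

-- ===== PORT A =====
def sum_of_borders (nums : List (List Int)) : Int :=
  if nums = [] then 0
  else
    let rows : Int := nums.length
    let cols : Int := (PySem.List.pyGetD nums 0 []).length
    (PySem.List.pyRange 0 rows 1).foldl (fun total i =>
      (PySem.List.pyRange 0 cols 1).foldl (fun total j =>
        if i = 0 ∨ i = rows - 1 ∨ j = 0 ∨ j = cols - 1 then
          total + PySem.List.pyGetD (PySem.List.pyGetD nums i []) j 0
        else total) total) 0

-- ===== PORT B =====
def sum_of_borders_alt (nums : List (List Int)) : Int :=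
  if nums = [] then 0
  else
    let cols : Int := (PySem.List.pyGetD nums 0 []).length
    if cols = 0 then 0
    else
      let rows : Int := nums.length
      if rows = 1 then (PySem.List.slice (PySem.List.pyGetD nums 0 []) none (some cols)).sum
      else
        let total : Int :=
          (PySem.List.slice (PySem.List.pyGetD nums 0 []) none (some cols)).sum +
          (PySem.List.slice (PySem.List.pyGetD nums (-1) []) none (some cols)).sum
        (PySem.List.slice nums (some 1) (some (-1))).foldl (fun total row =>
          total + PySem.List.pyGetD row 0 0 +
            (if 1 < cols then PySem.List.pyGetD row (cols - 1) 0 else 0)) total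

-- ===== PRECONDITION & SPEC =====
-- Pre_ excludes exactly the ragged inputs on which A raises IndexError: a row shorter than
-- the first row (with the first row nonempty).  A returns on every other input.
def Pre_sum_of_borders (nums : List (List Int)) : Prop :=
  nums = [] ∨ (nums.headD []).length = 0 ∨ ∀ row ∈ nums, (nums.headD []).length ≤ row.length
instance (nums : List (List Int)) : Decidable (Pre_sum_of_borders nums) := by
  unfold Pre_sum_of_borders; infer_instance
def pvWitness_sum_of_borders : List (List Int) := [[1, 2], [3, 4], [5, 6]]

def Spec_sum_of_borders (nums : List (List Int)) (out : Int) : Prop := out = sum_of_borders_alt nums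
instance (nums : List (List Int)) (out : Int) : Decidable (Spec_sum_of_borders nums out) := by unfold Spec_sum_of_borders; infer_instance

-- ===== CLAIM (what is proved, stated in full; the proofs are below) =====
def Claim_equal_sum_of_borders : Prop := ∀ (nums : List (List Int)), Dom_sum_of_borders nums → Pre_sum_of_borders nums → Spec_sum_of_borders nums (sum_of_borders nums)

-- ===== LEMMAS AND PROOFS =====

-- the inner loop when the border test holds for every j (first / last row): it sums row[:n]
theorem pv_inner_all (row : List Int) (n : Nat) (hn : n ≤ row.length) (t : Int) :
    (PySem.List.pyRange 0 (n : Int) 1).foldl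
      (fun t j => t + PySem.List.pyGetD row j 0) t = t + (row.take n).sum := by
  induction n generalizing t with
  | zero => simp
  | succ m ih =>
    have hsplit := PySem.List.pyRange_one_succ_right (a := 0) (b := (m : Int)) (by omega)
    rw [show ((m + 1 : Nat) : Int) = (m : Int) + 1 by push_cast; ring, hsplit, List.foldl_append,
      ih (by omega)]
    have hm : m < row.length := by omega
    simp only [List.foldl_cons, List.foldl_nil, PySem.List.pyGetD_natCast]
    rw [List.getD_eq_getElem _ _ hm, List.take_add_one, List.sum_append]
    simp [List.getElem?_eq_getElem hm, add_assoc]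

theorem pv_foldl_fixed {α : Type} (l : List α) (t : Int) : l.foldl (fun t _ => t) t = t := by
  induction l generalizing t with
  | nil => rfl
  | cons x xs ih => simp only [List.foldl_cons]; exact ih t

-- the inner loop on a middle row: only j = 0 and j = cols-1 contribute
theorem pv_inner_mid (row : List Int) (n : Nat) (hn1 : 1 ≤ n) (hn : n ≤ row.length) (t : Int) :
    (PySem.List.pyRange 0 (n : Int) 1).foldl
      (fun t j => if j = 0 ∨ j = (n : Int) - 1 then t + PySem.List.pyGetD row j 0 else t) t
    = t + PySem.List.pyGetD row 0 0 +
        (if 1 < (n : Int) then PySem.List.pyGetD row ((n : Int) - 1) 0 else 0) := by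
  rcases Nat.lt_or_ge n 2 with h2 | h2
  · have : n = 1 := by omega
    subst this
    rw [show ((1 : Nat) : Int) = 0 + 1 by ring, PySem.List.pyRange_one_singleton]
    simp
  · have hsplit1 := PySem.List.pyRange_one_append 0 1 (n : Int) (by omega) (by exact_mod_cast h2.trans' (by omega))
    have hsplit2 := PySem.List.pyRange_one_append 1 ((n : Int) - 1) (n : Int) (by omega) (by omega)
    have hone : PySem.List.pyRange 0 1 1 = [0] := by decide
    have hlastr : PySem.List.pyRange ((n : Int) - 1) (n : Int) 1 = [(n : Int) - 1] := by
      rw [PySem.List.pyRange_one_cons (by omega), PySem.List.pyRange_one_eq_nil (by omega)]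
    rw [hsplit1, hsplit2, hone, hlastr, List.foldl_append, List.foldl_append]
    have hmid : ∀ (t : Int),
        (PySem.List.pyRange 1 ((n : Int) - 1) 1).foldl
          (fun t j => if j = 0 ∨ j = (n : Int) - 1 then t + PySem.List.pyGetD row j 0 else t) t = t := by
      intro t
      rw [PySem.List.foldl_congr_mem (PySem.List.pyRange 1 ((n : Int) - 1) 1) _
        (fun t _ => t) t
        (by intro acc x hx
            rcases (PySem.List.mem_pyRange_one).1 hx with ⟨ha, hb⟩
            simp only [if_neg (by omega : ¬(x = 0 ∨ x = (n : Int) - 1))])]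
      exact pv_foldl_fixed _ t
    rw [hmid]
    simp only [List.foldl_cons, List.foldl_nil]
    have : (1 : Int) < (n : Int) := by exact_mod_cast h2
    simp [this]

-- B's nums[1:-1] is the list of middle rows
theorem pv_slice_mid {α : Type} (L : List α) (h : 2 ≤ L.length) :
    PySem.List.slice L (some 1) (some (-1)) = (L.drop 1).take (L.length - 2) := by
  have hc1 : PySem.List.clampIdx L.length 1 = 1 := by
    simp [PySem.List.clampIdx]; omega
  simp only [PySem.List.slice, hc1, PySem.List.clampIdx_neg_one]
  rw [Nat.sub_sub]

-- ===== VERDICT (by name: the statement is the Claim_ definition above) =====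
theorem sum_of_borders_spec : Claim_equal_sum_of_borders := by
  intro nums _ hpre
  unfold Spec_sum_of_borders sum_of_borders sum_of_borders_alt
  by_cases hnil : nums = []
  · simp [hnil]
  simp only [if_neg hnil]
  obtain ⟨r0, rest, rfl⟩ := List.exists_cons_of_ne_nil hnil
  rw [PySem.List.pyGetD_zero_cons]
  by_cases hc0 : r0.length = 0
  · -- no columns: A's inner loop is empty, both sides are 0
    rw [if_pos (by exact_mod_cast hc0)]
    rw [PySem.List.foldl_congr_mem _ _ (fun (t : Int) (_ : Int) => t) 0
      (by intro acc i _
          simp [hc0])]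
    exact pv_foldl_fixed _ 0
  rw [if_neg (by exact_mod_cast hc0)]
  have hall : ∀ row ∈ r0 :: rest, r0.length ≤ row.length := by
    rcases hpre with h | h | h
    · exact absurd h hnil
    · exact absurd (by simpa using h) hc0
    · simpa using h
  by_cases h1 : rest = []
  · subst h1
    rw [if_pos (by simp)]
    rw [show (([r0] : List (List Int)).length : Int) = 1 from by simp,
      show PySem.List.pyRange (0 : Int) 1 1 = [0] from by decide]
    simp only [List.foldl_cons, List.foldl_nil, true_or, if_true,
      PySem.List.pyGetD_zero_cons]
    rw [pv_inner_all r0 r0.length le_rfl 0, PySem.List.slice_to_natCast]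
    simp
  -- main case: at least two rows
  have hrl0 : rest.length ≠ 0 := fun h => h1 (List.length_eq_zero_iff.mp h)
  have hlen2 : 2 ≤ (r0 :: rest).length := by simp only [List.length_cons]; omega
  have hRge : (2 : Int) ≤ ((r0 :: rest).length : Int) := by exact_mod_cast hlen2
  rw [if_neg (by simp only [List.length_cons]; push_cast; omega)]
  have hs1 := PySem.List.pyRange_one_append 0 1 (((r0 :: rest).length : Int)) (by omega) (by omega)
  have hs2 := PySem.List.pyRange_one_append 1 (((r0 :: rest).length : Int) - 1)
    (((r0 :: rest).length : Int)) (by omega) (by omega)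
  have hone : PySem.List.pyRange (0 : Int) 1 1 = [0] := by decide
  have hlast : PySem.List.pyRange (((r0 :: rest).length : Int) - 1) ((r0 :: rest).length : Int) 1
      = [((r0 :: rest).length : Int) - 1] := by
    rw [PySem.List.pyRange_one_cons (by omega), PySem.List.pyRange_one_eq_nil (by omega)]
  rw [hs1, hs2, hone, hlast, List.foldl_append, List.foldl_append]
  simp only [List.foldl_cons, List.foldl_nil, true_or, or_true, if_true,
    PySem.List.pyGetD_zero_cons]
  -- last row fetched by A equals the list's last element
  have hlastrow : PySem.List.pyGetD (r0 :: rest) (((r0 :: rest).length : Int) - 1) ([] : List Int)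
      = (r0 :: rest).getLast hnil := by
    rw [PySem.List.pyGetD_eq_getElem _ _ (by omega) (by omega), List.getLast_eq_getElem]
    simp only [show ((((r0 :: rest).length : Int) - 1)).toNat = (r0 :: rest).length - 1 from by omega]
  have hlastlen : r0.length ≤ ((r0 :: rest).getLast hnil).length :=
    hall _ (List.getLast_mem hnil)
  -- first chunk
  rw [pv_inner_all r0 r0.length le_rfl 0]
  -- last chunk
  rw [hlastrow, pv_inner_all ((r0 :: rest).getLast hnil) r0.length hlastlen]
  -- middle chunk: each middle row contributes its two border elements
  rw [PySem.List.foldl_congr_mem (PySem.List.pyRange 1 (((r0 :: rest).length : Int) - 1) 1) _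
      (fun t i => t + (PySem.List.pyGetD (PySem.List.pyGetD (r0 :: rest) i []) 0 0 +
        (if 1 < (r0.length : Int) then
          PySem.List.pyGetD (PySem.List.pyGetD (r0 :: rest) i []) ((r0.length : Int) - 1) 0
        else 0))) _
      (by intro acc i hi
          rcases PySem.List.mem_pyRange_one.mp hi with ⟨hi1, hi2⟩
          have hrow : PySem.List.pyGetD (r0 :: rest) i ([] : List Int) ∈ r0 :: rest :=
            PySem.List.pyGetD_mem _ _ ⟨by omega, by omega⟩
          rw [PySem.List.foldl_congr_mem _ _
              (fun t j => if j = 0 ∨ j = (r0.length : Int) - 1 then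
                t + PySem.List.pyGetD (PySem.List.pyGetD (r0 :: rest) i []) j 0 else t) acc
              (by intro a j _
                  rw [if_congr (show (i = 0 ∨ i = ((r0 :: rest).length : Int) - 1 ∨ j = 0 ∨
                      j = (r0.length : Int) - 1) ↔ (j = 0 ∨ j = (r0.length : Int) - 1) from by
                    omega) rfl rfl]),
            pv_inner_mid _ r0.length (by omega) (hall _ hrow) acc, add_assoc])]
  rw [PySem.List.foldl_add]
  -- B side
  rw [PySem.List.pyGetD_neg_one _ _ hnil, PySem.List.slice_to_natCast,
    PySem.List.slice_to_natCast, pv_slice_mid _ hlen2]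
  rw [PySem.List.foldl_congr_mem _ _
      (fun t row => t + (PySem.List.pyGetD row 0 0 +
        (if 1 < (r0.length : Int) then PySem.List.pyGetD row ((r0.length : Int) - 1) 0 else 0))) _
      (by intro acc row _; rw [add_assoc]),
    PySem.List.foldl_add]
  -- the two middle sums agree
  have hmaps : List.map (fun i => PySem.List.pyGetD (PySem.List.pyGetD (r0 :: rest) i []) 0 0 +
        (if 1 < (r0.length : Int) then
          PySem.List.pyGetD (PySem.List.pyGetD (r0 :: rest) i []) ((r0.length : Int) - 1) 0
        else 0)) (PySem.List.pyRange 1 (((r0 :: rest).length : Int) - 1) 1)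
      = List.map (fun row => PySem.List.pyGetD row 0 0 +
        (if 1 < (r0.length : Int) then PySem.List.pyGetD row ((r0.length : Int) - 1) 0 else 0))
        (((r0 :: rest).drop 1).take ((r0 :: rest).length - 2)) := by
    rw [List.map_congr_left (g := fun i =>
        (fun row => PySem.List.pyGetD row 0 0 +
          (if 1 < (r0.length : Int) then PySem.List.pyGetD row ((r0.length : Int) - 1) 0 else 0))
        (PySem.List.pyGetD (r0 :: rest).dropLast i ([] : List Int)))
      (by intro i hi
          rcases PySem.List.mem_pyRange_one.mp hi with ⟨hi1, hi2⟩
          have hdl : PySem.List.pyGetD (r0 :: rest) i ([] : List Int)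
              = PySem.List.pyGetD (r0 :: rest).dropLast i ([] : List Int) := by
            rw [PySem.List.pyGetD_eq_getElem _ _ (by omega) (by omega),
              PySem.List.pyGetD_eq_getElem _ _ (by omega)
                (by simp only [List.length_dropLast]; omega),
              List.getElem_dropLast]
          rw [hdl])]
    have hmidlist : List.take ((r0 :: rest).length - 2) (List.drop 1 (r0 :: rest))
        = List.map (fun j => PySem.List.pyGetD (r0 :: rest).dropLast j ([] : List Int))
            (PySem.List.pyRange 1 (((r0 :: rest).length : Int) - 1) 1) := by
      rw [show (((r0 :: rest).length : Int) - 1)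
          = (((r0 :: rest).dropLast.length : Nat) : Int) from by
        simp only [List.length_dropLast]; omega]
      rw [PySem.List.map_pyGetD_pyRange' (r0 :: rest).dropLast ([] : List Int) (by omega)]
      rw [List.dropLast_eq_take, List.drop_take, Int.toNat_one, Nat.sub_sub]
    rw [hmidlist, List.map_map]
    rfl
  rw [hmaps]
  ring
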